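/- GENERATED by farm/mkstatement.py from design/units.tsv (unit `digest_file.COMPOSITION`) and the Specs of Gif/Spec/*.lean — do not edit.
   THE STATEMENT of the proof unit `digest_file.COMPOSITION`: the function `digest_file` (146 instructions) satisfies its contract,
   GIVEN THE STATEMENTS OF ITS 7 SEGMENTS (`Gif.Spec.digest_file.Seg<k> Lay μ u₀`: what the unit `digest_file.<k>` proves).
   No machine code is walked: `ReachVia.trans` along the segments (the exit assertion of a segment is the entry assertion of
   its successor), an induction on the loop measures. What the names mean: ProgX/Base/Spec/Basic.lean. The theorem to prove:
   `theorem digest_file_COMPOSITION_ok : Gif.Spec.digest_file_COMPOSITION.Statement`. -/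
import Gif.Code
import Gif.Dec.All
import Gif.Labels
import Gif.Spec.Driver
import Gif.Spec.Seg_digest_file
namespace Gif.Spec.digest_file_COMPOSITION
open X86 X86.User Asan

/-- The statement of unit `digest_file.COMPOSITION`. -/
def Statement : Prop :=
  ∀ (Lay : Layout) (_hLay : Lay.hi = 0x1000000) (μ : Microarch) (_hμ : UserX.MicroOK μ) (u₀ : State)
    (_h_digest_file_1 : Gif.Spec.digest_file.Seg1 Lay μ u₀)
    (_h_digest_file_2 : Gif.Spec.digest_file.Seg2 Lay μ u₀)
    (_h_digest_file_3 : Gif.Spec.digest_file.Seg3 Lay μ u₀)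
    (_h_digest_file_4 : Gif.Spec.digest_file.Seg4 Lay μ u₀)
    (_h_digest_file_5 : Gif.Spec.digest_file.Seg5 Lay μ u₀)
    (_h_digest_file_6 : Gif.Spec.digest_file.Seg6 Lay μ u₀)
    (_h_digest_file_7 : Gif.Spec.digest_file.Seg7 Lay μ u₀),
    ∀ (H : Heap) (rest : List Obj) (frames : List (Nat × FrameLayout)) (F : Forest) (R : Rd), Calls Lay μ ProgX.Base.WayInv (ProgX.Base.conv u₀) Gif.L.digest_file.entry (Gif.Spec.digest_file.spec H rest frames F R)

end Gif.Spec.digest_file_COMPOSITION
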